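-- pv_equiv track=rewrite | github.com/TheSuperPixel/rubiks-cube-robot | src/tools/solve.py | encode_12C4_8_to_11
-- ===== SOURCE A (Python) =====
-- def get_combinations(n,m):
--     c = 1
--     for i in range(m):
--         c *=  n - i
--         c //= i + 1
--     return c
--
-- def encode_12C4_8_to_11(x):
--     comb = 0
--     j = 4
--     for i in range(12-1,-1,-1):# 11,10,...,2,1,0
--         if x[i] >= 8:          # 11 10 9 8
--             comb += get_combinations(i,j)
--             j -= 1
--     return comb
-- ===== SOURCE B (Python) =====
-- def _binom(n, m):
--     # Pascal's-rule DP row; 1 when m <= 0, 0 when m > n (for n >= 0).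
--     if m <= 0:
--         return 1
--     if m > n:
--         return 0
--     row = [1]
--     for _ in range(n):
--         row = [1] + [a + b for a, b in zip(row, row[1:])] + [1]
--     return row[m]
--
-- def encode_12C4_8_to_11(x):
--     sel = [i for i in range(11, -1, -1) if x[i] >= 8]
--     return sum(_binom(p, 4 - k) for k, p in enumerate(sel))
-- ===== Notes on version B (the rewrite author's own statement) =====
-- stated objective: alternative
-- what changed: splits A's single interleaved scan with a mutable counter into a selection pass plus an enumerated sum, and computes each binomial by an additive Pascal's-rule DP row instead of A's multiplicative floor-division loop
import Mathlib
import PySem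

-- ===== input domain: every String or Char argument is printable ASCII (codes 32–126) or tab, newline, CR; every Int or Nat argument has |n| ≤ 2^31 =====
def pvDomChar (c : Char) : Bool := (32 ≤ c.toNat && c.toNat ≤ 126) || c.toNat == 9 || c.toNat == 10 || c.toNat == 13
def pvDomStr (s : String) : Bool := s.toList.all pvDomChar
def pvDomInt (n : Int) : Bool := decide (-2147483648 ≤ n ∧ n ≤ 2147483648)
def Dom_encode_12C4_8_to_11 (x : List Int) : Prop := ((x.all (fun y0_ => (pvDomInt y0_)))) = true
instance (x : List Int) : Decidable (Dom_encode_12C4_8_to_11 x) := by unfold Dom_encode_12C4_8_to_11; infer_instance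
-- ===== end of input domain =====

-- B splits A's interleaved scan into a selection pass plus an enumerated sum and computes each
-- binomial with a Pascal's-rule DP row instead of A's multiplicative floor-division loop (alternative).


-- ===== PORT A =====
-- c = 1; for i in range(m): c *= n - i; c //= i + 1
def get_combinations (n m : Int) : Int :=
  (PySem.List.pyRange 0 m 1).foldl
    (fun c i => PySem.Int.floordiv (c * (n - i)) (i + 1)) 1

-- x[i] is in range whenever Pre_ holds; the .getD 0 only totalises the out-of-Pre_ cases
def encode_12C4_8_to_11 (x : List Int) : Int :=
  ((PySem.List.pyRange 11 (-1) (-1)).foldl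
    (fun (st : Int × Int) i =>
      if 8 ≤ (PySem.List.pyGet? x i).getD 0 then (st.1 + get_combinations i st.2, st.2 - 1)
      else st)
    (0, 4)).1

-- ===== PORT B =====
-- Pascal's-rule row: row = [1] + [a+b for a,b in zip(row, row[1:])] + [1], n times; then row[m]
def pascal_binom (n m : Int) : Int :=
  if m ≤ 0 then 1
  else if n < m then 0
  else
    let row := (PySem.List.pyRange 0 n 1).foldl
      (fun row _ => 1 :: (List.zipWith (· + ·) row (PySem.List.slice row (some 1) none) ++ [1])) [1]
    (PySem.List.pyGet? row m).getD 0   -- row[m]: in range here since 0 < m ≤ n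

def encode_12C4_8_to_11_alt (x : List Int) : Int :=
  (PySem.List.enumerate
      ((PySem.List.pyRange 11 (-1) (-1)).filter (fun i => 8 ≤ (PySem.List.pyGet? x i).getD 0)) 0).foldl
    (fun t kp => t + pascal_binom kp.2 (4 - kp.1)) 0

-- ===== PRECONDITION & SPEC =====
-- A indexes the first twelve entries; it raises IndexError on shorter lists, and so does B.
def Pre_encode_12C4_8_to_11 (x : List Int) : Prop := 12 ≤ x.length
instance (x : List Int) : Decidable (Pre_encode_12C4_8_to_11 x) := by unfold Pre_encode_12C4_8_to_11; infer_instance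
def pvWitness_encode_12C4_8_to_11 : List Int := [9, 0, 8, 0, 0, 10, 0, 0, 0, 0, 11, 0]

def Spec_encode_12C4_8_to_11 (x : List Int) (out : Int) : Prop := out = encode_12C4_8_to_11_alt x
instance (x : List Int) (out : Int) : Decidable (Spec_encode_12C4_8_to_11 x out) := by unfold Spec_encode_12C4_8_to_11; infer_instance

-- ===== CLAIM (what is proved, stated in full; the proofs are below) =====
def Claim_equal_encode_12C4_8_to_11 : Prop := ∀ (x : List Int), Dom_encode_12C4_8_to_11 x → Pre_encode_12C4_8_to_11 x → Spec_encode_12C4_8_to_11 x (encode_12C4_8_to_11 x)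

-- ===== LEMMAS AND PROOFS =====

-- the two binomial helpers agree on all arguments the loop can produce
theorem combEq (n m : Int) (h0 : 0 ≤ n) (h1 : n ≤ 11) (h4 : m ≤ 4) :
    get_combinations n m = pascal_binom n m := by
  by_cases hm : m ≤ 0
  · have he : (PySem.List.pyRange 0 m 1) = [] := by
      rw [PySem.List.pyRange_one, show (m - 0).toNat = 0 from by omega]
      simp
    simp [get_combinations, pascal_binom, he, hm]
  · have hm1 : 1 ≤ m := by omega
    interval_cases n <;> interval_cases m <;> decide

-- descending sum with decrementing second argument
def gsum (g : Int → Int → Int) (j : Int) : List Int → Int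
  | [] => 0
  | p :: t => g p j + gsum g (j - 1) t

theorem enum_foldl_eq_gsum (g : Int → Int → Int) :
    ∀ (s : List Int) (j s0 acc : Int),
      (PySem.List.enumerate s s0).foldl (fun t kp => t + g kp.2 (j - kp.1)) acc
        = acc + gsum g (j - s0) s := by
  intro s
  induction s with
  | nil => intro j s0 acc; simp [PySem.List.enumerate_nil, gsum]
  | cons p t ih =>
    intro j s0 acc
    rw [PySem.List.enumerate_cons]
    simp only [List.foldl_cons]
    rw [ih j (s0 + 1) (acc + g p (j - s0))]
    have : j - (s0 + 1) = j - s0 - 1 := by ring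
    rw [this]
    simp [gsum, add_assoc]

theorem loop_eq_gsum (g : Int → Int → Int) (P : Int → Prop) [DecidablePred P] :
    ∀ (l : List Int) (c j : Int),
      (l.foldl (fun (st : Int × Int) i =>
          if P i then (st.1 + g i st.2, st.2 - 1) else st) (c, j)).1
        = c + gsum g j (l.filter (fun i => decide (P i))) := by
  intro l
  induction l with
  | nil => intro c j; simp [gsum]
  | cons i l ih =>
    intro c j
    simp only [List.foldl_cons, List.filter_cons]
    by_cases h : P i
    · simp only [h, if_true]
      rw [ih (c + g i j) (j - 1)]
      simp [gsum, add_assoc]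
    · simp [h, ih c j]

theorem gsum_congr :
    ∀ (s : List Int) (j : Int), (∀ p ∈ s, 0 ≤ p ∧ p ≤ 11) → j ≤ 4 →
      gsum get_combinations j s = gsum pascal_binom j s := by
  intro s
  induction s with
  | nil => intro j _ _; rfl
  | cons p t ih =>
    intro j hmem hj
    have hp := hmem p (by simp)
    simp only [gsum]
    rw [combEq p j hp.1 hp.2 hj,
        ih (j - 1) (fun q hq => hmem q (by simp [hq])) (by omega)]

theorem range_down_mem : ∀ i ∈ PySem.List.pyRange 11 (-1) (-1), 0 ≤ i ∧ i ≤ 11 := by decide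

-- ===== VERDICT (by name: the statement is the Claim_ definition above) =====
theorem encode_12C4_8_to_11_spec : Claim_equal_encode_12C4_8_to_11 := by
  intro x _ _
  unfold Spec_encode_12C4_8_to_11 encode_12C4_8_to_11 encode_12C4_8_to_11_alt
  rw [loop_eq_gsum get_combinations (fun i => 8 ≤ (PySem.List.pyGet? x i).getD 0),
      enum_foldl_eq_gsum pascal_binom _ 4 0 0]
  
  simp only [zero_add, sub_zero]
  exact gsum_congr _ 4
    (fun p hp => range_down_mem p (List.mem_of_mem_filter hp)) le_rfl
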